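-- pv_equiv track=rewrite | github.com/sgandavarapu/makenewscredibleagain | mnca.py | remove_cap_punc
-- ===== SOURCE A (Python) =====
-- import string
--
-- def remove_cap_punc(in_string):
--     """Function removes capitalization and punctuation from string."""
--     out_string = in_string
--     translator = str.maketrans('', '', string.punctuation)
--     out_string = out_string.translate(translator)
--     out_words = out_string.split()
--     out_words = [word.lower() for word in out_words]
--     out_string = ' '.join(word for word in out_words)
--     return(out_string)
-- ===== SOURCE B (Python) =====
-- import string
--
-- def remove_cap_punc(in_string):
--     """Function removes capitalization and punctuation from string."""
--     punct = set(string.punctuation)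
--     out = []
--     pending = False          # a word boundary (whitespace) was seen
--     for c in in_string:
--         if c in punct:
--             continue         # punctuation disappears, it is not a boundary
--         if c.isspace():
--             pending = True
--         else:
--             if pending and out:
--                 out.append(' ')
--             out.append(c.lower())
--             pending = False
--     return ''.join(out)
-- ===== Notes on version B (the rewrite author's own statement) =====
-- stated objective: alternative
-- what changed: A makes three staged whole-string passes (translate to delete punctuation, split into words, lowercase and rejoin); B is a single character-level state machine over the input that skips punctuation, tracks a pending word-boundary flag for whitespace runs, and emits lowercased characters with separating spaces directly into one output buffer.
import Mathlib
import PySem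

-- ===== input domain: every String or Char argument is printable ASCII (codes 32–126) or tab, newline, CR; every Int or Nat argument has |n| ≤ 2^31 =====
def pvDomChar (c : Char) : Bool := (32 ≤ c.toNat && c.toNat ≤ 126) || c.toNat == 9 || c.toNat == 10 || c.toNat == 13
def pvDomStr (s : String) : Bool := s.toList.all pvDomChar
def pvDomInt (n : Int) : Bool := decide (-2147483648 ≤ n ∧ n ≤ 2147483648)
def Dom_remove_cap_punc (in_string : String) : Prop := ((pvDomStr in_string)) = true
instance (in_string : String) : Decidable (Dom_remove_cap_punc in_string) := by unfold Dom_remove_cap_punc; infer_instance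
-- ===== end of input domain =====

-- B replaces A's three staged whole-string passes (delete punctuation, split, lowercase+join)
-- by one character-level state machine that emits the result in a single pass.

-- string.punctuation, as its list of characters
def pyPunct : List Char := ['!', '\"', '#', '$', '%', '&', '\'', '(', ')', '*', '+', ',', '-', '.', '/', ':', ';', '<', '=', '>', '?', '@', '[', '\\', ']', '^', '_', '`', '{', '|', '}', '~']

-- keep a char iff it is NOT punctuation (str.translate with a pure deletion table is exactly this filter)
def pvKeep (c : Char) : Bool := !(pyPunct.contains c)

-- ===== PORT A =====
def remove_cap_punc (in_string : String) : String :=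
  let out_string := in_string
  -- out_string.translate(str.maketrans('', '', string.punctuation)) — hand port, exact: delete punctuation chars
  let out_string := String.ofList (out_string.toList.filter pvKeep)
  let out_words := PySem.Str.split₀ out_string
  let out_words := out_words.map PySem.Str.lower
  PySem.Str.join " " out_words

-- ===== PORT B =====
-- one step of B's loop body: state = (output buffer, pending word-boundary flag)
def pvStep (st : List Char × Bool) (c : Char) : List Char × Bool :=
  if pyPunct.contains c then st
  else if PySem.Chars.isspace c then (st.1, true)
  else ((st.1 ++ (if st.2 && !st.1.isEmpty then [' '] else [])) ++ [PySem.Chars.lowerChar c], false)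

def remove_cap_punc_alt (in_string : String) : String :=
  String.ofList (in_string.toList.foldl pvStep ([], false)).1

-- ===== PRECONDITION & SPEC =====
def Spec_remove_cap_punc (in_string : String) (out : String) : Prop := out = remove_cap_punc_alt in_string
instance (in_string : String) (out : String) : Decidable (Spec_remove_cap_punc in_string out) := by unfold Spec_remove_cap_punc; infer_instance

-- ===== CLAIM (what is proved, stated in full; the proofs are below) =====
def Claim_equal_remove_cap_punc : Prop := ∀ (in_string : String), Dom_remove_cap_punc in_string → Spec_remove_cap_punc in_string (remove_cap_punc in_string)

-- ===== LEMMAS AND PROOFS =====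

-- accumulator-free description of split₀.go
def pvWords : List Char → List Char → List (List Char)
  | [], cur => if cur.isEmpty then [] else [cur.reverse]
  | c :: rest, cur =>
      if PySem.Chars.isspace c then
        if cur.isEmpty then pvWords rest [] else cur.reverse :: pvWords rest []
      else pvWords rest (c :: cur)

lemma go_eq_pvWords (s cur : List Char) (acc : List (List Char)) :
    PySem.Chars.split₀.go s cur acc = acc.reverse ++ pvWords s cur := by
  induction s generalizing cur acc with
  | nil => simp only [PySem.Chars.split₀.go, pvWords]; split_ifs <;> simp
  | cons c rest ih =>
      simp only [PySem.Chars.split₀.go, pvWords]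
      split_ifs with h1 h2 <;> simp [ih]

lemma split₀_eq_pvWords (s : List Char) : PySem.Chars.split₀ s = pvWords s [] := by
  simp [PySem.Chars.split₀, go_eq_pvWords]

-- " ".join of the lowercased words, on the list side
def pvJ (ws : List (List Char)) : List Char :=
  PySem.Chars.join [' '] (ws.map PySem.Chars.lower)

-- B's loop, as structural recursion over the remaining input:
-- p = pending word-boundary flag, ne = "output so far is nonempty"
def pvEmit : List Char → Bool → Bool → List Char
  | [], _, _ => []
  | c :: rest, p, ne =>
      if pyPunct.contains c then pvEmit rest p ne
      else if PySem.Chars.isspace c then pvEmit rest true ne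
      else (if p && ne then [' '] else []) ++ (PySem.Chars.lowerChar c :: pvEmit rest false true)

lemma foldl_eq_pvEmit (t : List Char) : ∀ (out : List Char) (p : Bool),
    (t.foldl pvStep (out, p)).1 = out ++ pvEmit t p (!out.isEmpty) := by
  induction t with
  | nil => intro out p; simp [pvEmit]
  | cons c rest ih =>
      intro out p
      simp only [List.foldl_cons, pvStep, pvEmit]
      by_cases h1 : pyPunct.contains c = true
      · rw [if_pos h1, if_pos h1]; exact ih out p
      · rw [if_neg h1, if_neg h1]
        by_cases h2 : PySem.Chars.isspace c = true
        · rw [if_pos h2, if_pos h2]; exact ih out true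
        · rw [if_neg h2, if_neg h2, ih]
          cases out <;> simp

lemma pvWords_ne_nil (t : List Char) : ∀ cur : List Char, cur ≠ [] → pvWords t cur ≠ [] := by
  induction t with
  | nil => intro cur h; simp [pvWords, h]
  | cons c rest ih =>
      intro cur h
      simp only [pvWords]
      split_ifs with h1 h2
      · exact absurd (List.isEmpty_iff.mp h2) h
      · simp
      · exact ih _ (by simp)

-- the joint invariant: mid-word continuation and pending-separator forms of B's loop
lemma pvMain (t : List Char) :
    (∀ cur : List Char, cur ≠ [] →
        pvJ (pvWords (t.filter pvKeep) cur) = PySem.Chars.lower cur.reverse ++ pvEmit t false true)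
    ∧ pvEmit t true true =
        (if (pvWords (t.filter pvKeep) []).isEmpty then []
         else ' ' :: pvJ (pvWords (t.filter pvKeep) [])) := by
  induction t with
  | nil =>
      constructor
      · intro cur h
        simp [pvWords, pvJ, h, pvEmit, PySem.Chars.join_singleton]
      · simp [pvWords, pvJ, pvEmit]
  | cons c rest ih =>
      obtain ⟨ih1, ih2⟩ := ih
      by_cases h1 : pyPunct.contains c = true
      · have hk : pvKeep c = false := by simp only [pvKeep, h1, Bool.not_true]
        constructor
        · intro cur h
          simp only [List.filter_cons, hk, Bool.false_eq_true, if_false, pvEmit, h1, if_true]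
          exact ih1 cur h
        · simp only [List.filter_cons, hk, Bool.false_eq_true, if_false, pvEmit, h1, if_true]
          exact ih2
      · have hb : pyPunct.contains c = false := by simpa using h1
        have hk' : pvKeep c = true := by simp only [pvKeep, hb, Bool.not_false]
        by_cases h2 : PySem.Chars.isspace c = true
        · constructor
          · intro cur h
            simp only [List.filter_cons, hk', if_true, pvWords, h2, if_pos,
              (by simpa using h : ¬ cur.isEmpty = true), if_neg, pvEmit, h1,
              Bool.false_eq_true, if_false]
            rw [ih2]
            by_cases hw : (pvWords (rest.filter pvKeep) []).isEmpty = true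
            · simp only [hw, if_true]
              simp [pvJ, List.isEmpty_iff.mp hw, PySem.Chars.join_singleton]
            · simp only [hw, Bool.false_eq_true, if_false]
              obtain ⟨w, ws, hws⟩ := List.exists_cons_of_ne_nil (by simpa using hw)
              simp [pvJ, hws, PySem.Chars.join_cons_cons]
          · simp only [List.filter_cons, hk', if_true, pvWords, h2, if_pos,
              List.isEmpty_nil, if_true, pvEmit, h1, Bool.false_eq_true, if_false]
            exact ih2
        · constructor
          · intro cur h
            simp only [List.filter_cons, hk', if_true, pvWords, h2, Bool.false_eq_true,
              if_false, pvEmit, h1]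
            rw [ih1 (c :: cur) (by simp)]
            simp [PySem.Chars.lower]
          · simp only [List.filter_cons, hk', if_true, pvWords, h2, Bool.false_eq_true,
              if_false, pvEmit, h1, Bool.true_and, if_true]
            have hne : (pvWords (rest.filter pvKeep) [c]).isEmpty = false := by
              simpa using pvWords_ne_nil (rest.filter pvKeep) [c] (by simp)
            rw [hne, ih1 [c] (by simp)]
            simp [PySem.Chars.lower]

-- the top-level form: empty output buffer
lemma pvEmit_zero (t : List Char) : ∀ p : Bool,
    pvEmit t p false = pvJ (pvWords (t.filter pvKeep) []) := by
  induction t with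
  | nil => intro p; simp [pvEmit, pvWords, pvJ, PySem.Chars.join_nil]
  | cons c rest ih =>
      intro p
      by_cases h1 : pyPunct.contains c = true
      · have hk : pvKeep c = false := by simp only [pvKeep, h1, Bool.not_true]
        simp only [pvEmit, h1, if_true, List.filter_cons, hk, Bool.false_eq_true, if_false]
        exact ih p
      · have hb : pyPunct.contains c = false := by simpa using h1
        have hk' : pvKeep c = true := by simp only [pvKeep, hb, Bool.not_false]
        by_cases h2 : PySem.Chars.isspace c = true
        · simp only [pvEmit, h1, Bool.false_eq_true, if_false, h2, if_true,
            List.filter_cons, hk', pvWords, List.isEmpty_nil]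
          exact ih true
        · simp only [pvEmit, h1, Bool.false_eq_true, if_false, h2, Bool.and_false,
            List.nil_append, List.filter_cons, hk', if_true, pvWords]
          rw [(pvMain rest).1 [c] (by simp)]
          simp [PySem.Chars.lower]

-- ===== VERDICT (by name: the statement is the Claim_ definition above) =====
theorem remove_cap_punc_spec : Claim_equal_remove_cap_punc := by
  intro s _
  unfold Spec_remove_cap_punc remove_cap_punc remove_cap_punc_alt
  apply String.toList_inj.mp
  rw [foldl_eq_pvEmit s.toList [] false]
  simp only [List.isEmpty_nil, Bool.not_true, List.nil_append, String.toList_ofList,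
    pvEmit_zero s.toList false]
  simp only [PySem.Str.toList_join]
  have htoks := PySem.Str.split₀_map_toList (String.ofList (s.toList.filter pvKeep))
  rw [String.toList_ofList] at htoks
  rw [List.map_map]
  have : List.map (String.toList ∘ PySem.Str.lower)
      (PySem.Str.split₀ (String.ofList (s.toList.filter pvKeep)))
      = List.map PySem.Chars.lower
        (List.map String.toList (PySem.Str.split₀ (String.ofList (s.toList.filter pvKeep)))) := by
    rw [List.map_map]
    exact List.map_congr_left (fun w _ => PySem.Str.toList_lower w)
  rw [this, htoks, split₀_eq_pvWords]
  simp [pvJ]
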